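-- pv_equiv track=rewrite | github.com/wang264/JiuZhangLintcode | AlgorithmAdvance/L5/require/395_coins-in-a-line-ii.py | firstWillWin
-- ===== SOURCE A (Python) =====
-- def firstWillWin(values):
--     n = len(values)
--     if n <= 2:
--         return True
--     dp = [None] * (n + 1)
--     dp[n - 1] = values[n - 1]  # i=len-1时,只有一个可以拿
--     dp[n - 2] = values[n - 1] + values[n - 2]  # i = len-2,有两个可拿，直接拿走
--     # 当i=len-3的时候，剩下最后三个，这时候如果拿一个，对方就会拿走两个，所以这次拿两个.然后对手拿走一个
--     dp[n - 3] = values[n - 2] + values[n - 3] - values[n - 1]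
--
--     for i in range(n - 4, -1, -1):
--         dp[i] = max(values[i] - dp[i + 1], values[i] + values[i + 1] - dp[i + 2])
--
--     return dp[0] >= 0
-- ===== SOURCE B (Python) =====
-- def firstWillWin(values):
--     n = len(values)
--     if n <= 2:
--         return True
--     # Walk from the last three coins down to index 0, carrying
--     # suf  = sum of values[i:]                  (running suffix total)
--     # t1   = max coins the mover collects from values[i:]
--     # t2   = max coins the mover collects from values[i+1:]
--     # The mover keeps suf minus whatever the opponent then collects,
--     # so take[i] = suf[i] - min(take[i+1], take[i+2]).
--     suf = values[n - 3] + values[n - 2] + values[n - 1]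
--     t1 = values[n - 3] + values[n - 2]
--     t2 = values[n - 2] + values[n - 1]
--     for i in range(n - 4, -1, -1):
--         suf += values[i]
--         t1, t2 = suf - min(t1, t2), t1
--     return 2 * t1 >= suf
-- ===== Notes on version B (the rewrite author's own statement) =====
-- stated objective: alternative
-- what changed: Replaces A's (n+1)-cell dp array of signed score differences with a single backward pass carrying three scalars (running suffix sum, mover's best collectible total for the current and next suffix) via take[i] = suf[i] - min(take[i+1], take[i+2]), deciding the win by comparing twice the first mover's collectible total with the whole-line sum.
import Mathlib
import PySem

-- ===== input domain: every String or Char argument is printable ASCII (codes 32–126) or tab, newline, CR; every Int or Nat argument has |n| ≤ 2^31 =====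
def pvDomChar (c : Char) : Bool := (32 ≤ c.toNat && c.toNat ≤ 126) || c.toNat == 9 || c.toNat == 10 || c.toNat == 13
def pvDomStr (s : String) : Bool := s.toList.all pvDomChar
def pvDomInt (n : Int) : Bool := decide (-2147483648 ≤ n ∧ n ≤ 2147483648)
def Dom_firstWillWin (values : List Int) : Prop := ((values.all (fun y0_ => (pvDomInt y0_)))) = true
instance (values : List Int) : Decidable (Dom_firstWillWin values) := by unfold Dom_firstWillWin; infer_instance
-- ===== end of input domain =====

-- B re-derives the same winner test from (suffix-sum, collected-score) bookkeeping instead of A's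
-- signed-difference dp array; objective: alternative decomposition, same O(n) cost.

-- ===== PORT A =====
-- loop body of A's 'for i in range(n-4,-1,-1)': dp[i] = max(values[i]-dp[i+1], values[i]+values[i+1]-dp[i+2]).
-- dp cells are read via pyGetD with default 0 (the indices i+1, i+2 are always in range and already written,
-- so the default, standing for Python's None placeholder, is never returned).
def pvStepA (values : List Int) (dp : List Int) (i : Int) : List Int :=
  dp.set i.toNat
    (max (PySem.List.pyGetD values i 0 - PySem.List.pyGetD dp (i + 1) 0)
         (PySem.List.pyGetD values i 0 + PySem.List.pyGetD values (i + 1) 0 -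
            PySem.List.pyGetD dp (i + 2) 0))

def firstWillWin (values : List Int) : Bool :=
  let n : Int := (values.length : Int)
  if n ≤ 2 then true
  else
    -- dp = [None]*(n+1); 0 stands for None (never read before being written)
    let dp0 : List Int := List.replicate (values.length + 1) 0
    let dp1 := dp0.set (values.length - 1) (PySem.List.pyGetD values (n - 1) 0)
    let dp2 := dp1.set (values.length - 2)
      (PySem.List.pyGetD values (n - 1) 0 + PySem.List.pyGetD values (n - 2) 0)
    let dp3 := dp2.set (values.length - 3)
      (PySem.List.pyGetD values (n - 2) 0 + PySem.List.pyGetD values (n - 3) 0 -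
        PySem.List.pyGetD values (n - 1) 0)
    let dp := (PySem.List.pyRange (n - 4) (-1) (-1)).foldl (pvStepA values) dp3
    decide (PySem.List.pyGetD dp 0 0 ≥ 0)

-- ===== PORT B =====
-- loop body of B's 'for i in range(n-4,-1,-1)': state (suf, t1, t2)
def pvStepB (values : List Int) (st : Int × Int × Int) (i : Int) : Int × Int × Int :=
  let suf := st.1 + PySem.List.pyGetD values i 0
  (suf, suf - min st.2.1 st.2.2, st.2.1)

def firstWillWin_alt (values : List Int) : Bool :=
  let n : Int := (values.length : Int)
  if n ≤ 2 then true
  else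
    let st := (PySem.List.pyRange (n - 4) (-1) (-1)).foldl (pvStepB values)
      (PySem.List.pyGetD values (n - 3) 0 + PySem.List.pyGetD values (n - 2) 0 +
         PySem.List.pyGetD values (n - 1) 0,
       PySem.List.pyGetD values (n - 3) 0 + PySem.List.pyGetD values (n - 2) 0,
       PySem.List.pyGetD values (n - 2) 0 + PySem.List.pyGetD values (n - 1) 0)
    decide (2 * st.2.1 ≥ st.1)

-- ===== PRECONDITION & SPEC =====
def Spec_firstWillWin (values : List Int) (out : Bool) : Prop := out = firstWillWin_alt values
instance (values : List Int) (out : Bool) : Decidable (Spec_firstWillWin values out) := by unfold Spec_firstWillWin; infer_instance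

-- ===== CLAIM (what is proved, stated in full; the proofs are below) =====
def Claim_equal_firstWillWin : Prop := ∀ (values : List Int), Dom_firstWillWin values → Spec_firstWillWin values (firstWillWin values)

-- ===== LEMMAS AND PROOFS =====

-- coupled loop invariant: before processing index m the A-side dp holds 2·take − suf at
-- cells m+1 and m+2, and this propagates down to cell 0.
lemma pv_loops (values : List Int) :
    ∀ (k : Nat) (m : Int), m + 1 = (k : Int) →
    ∀ (dp : List Int) (s t1 t2 : Int),
      m + 3 ≤ (dp.length : Int) →
      PySem.List.pyGetD dp (m + 1) 0 = 2 * t1 - s →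
      PySem.List.pyGetD dp (m + 2) 0 = 2 * t2 - (s - PySem.List.pyGetD values (m + 1) 0) →
      PySem.List.pyGetD ((PySem.List.pyRange m (-1) (-1)).foldl (pvStepA values) dp) 0 0
        = 2 * ((PySem.List.pyRange m (-1) (-1)).foldl (pvStepB values) (s, t1, t2)).2.1
          - ((PySem.List.pyRange m (-1) (-1)).foldl (pvStepB values) (s, t1, t2)).1 := by
  intro k
  induction k with
  | zero =>
    intro m hm dp s t1 t2 hlen h1 h2
    have hm' : m = -1 := by omega
    subst hm'
    rw [PySem.List.pyRange_neg_one_eq_nil (by omega)]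
    simpa using h1
  | succ k ih =>
    intro m hm dp s t1 t2 hlen h1 h2
    have hm0 : (0 : Int) ≤ m := by omega
    rw [PySem.List.pyRange_neg_one_cons (by omega)]
    simp only [List.foldl_cons]
    have hmlt : m < (dp.length : Int) := by omega
    have hm1lt : m + 1 < (dp.length : Int) := by omega
    -- abbreviations
    set vm := PySem.List.pyGetD values m 0 with hvm
    set vm1 := PySem.List.pyGetD values (m + 1) 0 with hvm1
    have hset : pvStepA values dp m
        = dp.set m.toNat (max (vm - (2 * t1 - s)) (vm + vm1 - (2 * t2 - (s - vm1)))) := by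
      rw [pvStepA, h1, h2]
    have hstB : pvStepB values (s, t1, t2) m = (s + vm, s + vm - min t1 t2, t1) := rfl
    rw [hset, hstB]
    apply ih (m - 1) (by omega)
    · simpa using (by omega : m - 1 + 3 ≤ (dp.length : Int))
    · -- cell (m-1)+1 = m of the updated dp
      rw [show (m - 1 + 1) = m from by omega]
      rw [PySem.List.pyGetD_eq_getElem _ _ (by omega) (by simpa using hmlt)]
      rw [List.getElem_set_self (by simp; omega)]
      omega
    · -- cell (m-1)+2 = m+1 of the updated dp is untouched
      rw [show (m - 1 + 2) = m + 1 from by omega, show (m - 1 + 1) = m from by omega]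
      rw [PySem.List.pyGetD_eq_getElem _ _ (by omega) (by simpa using hm1lt)]
      rw [List.getElem_set_ne (by omega)]
      rw [PySem.List.pyGetD_eq_getElem _ _ (by omega) hm1lt] at h1
      omega

lemma pv_init (L : Nat) (xs : List Int) (a b c : Int) (h3 : 3 ≤ L) (hL : xs.length = L + 1) :
    PySem.List.pyGetD (((xs.set (L - 1) a).set (L - 2) b).set (L - 3) c) ((L : Int) - 3) 0 = c ∧
    PySem.List.pyGetD (((xs.set (L - 1) a).set (L - 2) b).set (L - 3) c) ((L : Int) - 2) 0 = b := by
  have hlen : (((xs.set (L - 1) a).set (L - 2) b).set (L - 3) c).length = L + 1 := by simp [hL]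
  constructor
  · rw [PySem.List.pyGetD_of_nonneg _ _ (by omega), show ((L : Int) - 3).toNat = L - 3 from by omega]
    rw [List.getD_eq_getElem _ _ (by omega)]
    rw [List.getElem_set_self (by omega)]
  · rw [PySem.List.pyGetD_of_nonneg _ _ (by omega), show ((L : Int) - 2).toNat = L - 2 from by omega]
    rw [List.getD_eq_getElem _ _ (by omega)]
    rw [List.getElem_set_ne (by omega), List.getElem_set_self (by simp [hL])]

-- ===== VERDICT (by name: the statement is the Claim_ definition above) =====
theorem firstWillWin_spec : Claim_equal_firstWillWin := by
  intro values _
  unfold Spec_firstWillWin firstWillWin firstWillWin_alt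
  by_cases h2 : (values.length : Int) ≤ 2
  · simp [h2]
  · have h3 : 3 ≤ values.length := by omega
    simp only [h2, if_false]
    obtain ⟨hc3, hc2⟩ := pv_init values.length (List.replicate (values.length + 1) 0)
      (PySem.List.pyGetD values ((values.length : Int) - 1) 0)
      (PySem.List.pyGetD values ((values.length : Int) - 1) 0 +
        PySem.List.pyGetD values ((values.length : Int) - 2) 0)
      (PySem.List.pyGetD values ((values.length : Int) - 2) 0 +
        PySem.List.pyGetD values ((values.length : Int) - 3) 0 -
        PySem.List.pyGetD values ((values.length : Int) - 1) 0)
      h3 (by simp)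
    have key := pv_loops values ((values.length : Int) - 3).toNat ((values.length : Int) - 4)
      (by omega) ((((List.replicate (values.length + 1) 0).set (values.length - 1)
          (PySem.List.pyGetD values ((values.length : Int) - 1) 0)).set (values.length - 2)
          (PySem.List.pyGetD values ((values.length : Int) - 1) 0 +
            PySem.List.pyGetD values ((values.length : Int) - 2) 0)).set (values.length - 3)
          (PySem.List.pyGetD values ((values.length : Int) - 2) 0 +
            PySem.List.pyGetD values ((values.length : Int) - 3) 0 -
            PySem.List.pyGetD values ((values.length : Int) - 1) 0))
      (PySem.List.pyGetD values ((values.length : Int) - 3) 0 +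
        PySem.List.pyGetD values ((values.length : Int) - 2) 0 +
        PySem.List.pyGetD values ((values.length : Int) - 1) 0)
      (PySem.List.pyGetD values ((values.length : Int) - 3) 0 +
        PySem.List.pyGetD values ((values.length : Int) - 2) 0)
      (PySem.List.pyGetD values ((values.length : Int) - 2) 0 +
        PySem.List.pyGetD values ((values.length : Int) - 1) 0)
      (by simp; omega)
      (by rw [show (values.length : Int) - 4 + 1 = (values.length : Int) - 3 from by omega]
          rw [hc3]; omega)
      (by rw [show (values.length : Int) - 4 + 2 = (values.length : Int) - 2 from by omega,
             show (values.length : Int) - 4 + 1 = (values.length : Int) - 3 from by omega]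
          rw [hc2]; omega)
    rw [key, decide_eq_decide]
    omega
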